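-- pv_equiv track=rewrite | github.com/SalehO/GolumGlobe | GolemGlobe-updated/Map.py | clearStructures
-- ===== SOURCE A (Python) =====
-- from builtins import range
--
-- def _convertIndexToXZ(index,rows,cols):
--     z = index%cols + 1
--     x = abs(rows - index//cols -1)
--     return (x,z)
--
-- def clearStructures(number_row,num_cols,y,toHeight=False):
--     toClear = ""
--     maxY = y
--     if toHeight:
--         starty = 1
--     else:
--         starty = y
--     for y in range(starty,maxY+1):
--         for index in range(number_row*num_cols):
--             (x,z) = _convertIndexToXZ(index,number_row,num_cols)
--             toClear += "<DrawBlock x= " +"\""+ str(x)+"\""+ " y=\""+str(y)+"\" z= " +"\""+ str(z)+"\"" +" type=\"air\" />\n"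
--     return toClear
-- ===== SOURCE B (Python) =====
-- def clearStructures(number_row, num_cols, y, toHeight=False):
--     if number_row <= 0 or num_cols <= 0:
--         return ""
--     starty = 1 if toHeight else y
--     lines = []
--     for yy in range(starty, y + 1):
--         for r in range(number_row):
--             x = number_row - 1 - r
--             for c in range(num_cols):
--                 z = c + 1
--                 lines.append('<DrawBlock x= "' + str(x) + '" y="' + str(yy)
--                              + '" z= "' + str(z) + '" type="air" />\n')
--     return "".join(lines)
-- ===== Notes on version B (the rewrite author's own statement) =====
-- stated objective: simpler
-- what changed: Replaces the flat index loop with its //,% index-to-(x,z) decomposition and repeated string concatenation by direct nested row/column loops collecting lines into a list joined once.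
-- intended difference: When both number_row and num_cols are negative (and the y-loop runs), A's flat range over their positive product emits garbage blocks with negative or zero z coordinates, while B returns the empty string, the intended result for non-positive grid dimensions. — e.g. on clearStructures(-1, -1, 5, false): A returns "<DrawBlock x= \"2\" y=\"5\" z= \"1\" type=\"air\" />\n", B returns ""
import Mathlib
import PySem

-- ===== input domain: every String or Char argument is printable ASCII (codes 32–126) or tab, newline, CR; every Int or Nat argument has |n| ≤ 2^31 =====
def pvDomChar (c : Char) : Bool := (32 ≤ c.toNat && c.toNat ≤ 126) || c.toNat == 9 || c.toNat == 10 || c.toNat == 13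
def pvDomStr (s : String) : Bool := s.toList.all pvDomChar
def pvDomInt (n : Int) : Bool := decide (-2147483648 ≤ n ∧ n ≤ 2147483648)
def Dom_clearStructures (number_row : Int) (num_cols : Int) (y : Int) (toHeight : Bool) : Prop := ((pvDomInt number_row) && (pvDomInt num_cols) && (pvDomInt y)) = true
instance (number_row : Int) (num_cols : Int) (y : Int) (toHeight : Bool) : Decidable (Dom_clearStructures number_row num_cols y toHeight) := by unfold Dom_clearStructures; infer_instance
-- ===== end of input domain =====

-- B replaces A's flat index loop (with its //,% index→(x,z) helper and repeated string
-- concatenation) by direct nested row/column loops that collect the lines in a list joined once.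

-- the DrawBlock line both Pythons build (identical string expression in A and in B)
def pvLine (x : Int) (yy : Int) (z : Int) : String :=
  "<DrawBlock x= " ++ "\"" ++ PySem.Int.toStr x ++ "\"" ++ " y=\"" ++ PySem.Int.toStr yy
    ++ "\" z= " ++ "\"" ++ PySem.Int.toStr z ++ "\"" ++ " type=\"air\" />\n"

-- ===== PORT A =====
def pvConvertIndexToXZ (index : Int) (rows : Int) (cols : Int) : Int × Int :=
  let z := PySem.Int.mod index cols + 1
  let x := |rows - PySem.Int.floordiv index cols - 1|
  (x, z)

def clearStructures (number_row : Int) (num_cols : Int) (y : Int) (toHeight : Bool) : String :=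
  let maxY := y
  let starty := if toHeight then (1 : Int) else y
  (PySem.List.pyRange starty (maxY + 1)).foldl (fun toClear yy =>
    (PySem.List.pyRange 0 (number_row * num_cols)).foldl (fun acc index =>
      let xz := pvConvertIndexToXZ index number_row num_cols
      acc ++ pvLine xz.1 yy xz.2) toClear) ""

-- ===== PORT B =====
def clearStructures_alt (number_row : Int) (num_cols : Int) (y : Int) (toHeight : Bool) : String :=
  if number_row ≤ 0 ∨ num_cols ≤ 0 then "" else
  let starty := if toHeight then (1 : Int) else y
  let lines := (PySem.List.pyRange starty (y + 1)).foldl (fun acc yy =>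
    (PySem.List.pyRange 0 number_row).foldl (fun acc2 r =>
      let x := number_row - 1 - r
      (PySem.List.pyRange 0 num_cols).foldl (fun acc3 c =>
        let z := c + 1
        acc3 ++ [pvLine x yy z]) acc2) acc) ([] : List String)
  PySem.Str.join "" lines

-- ===== PRECONDITION & SPEC =====
-- When both number_row and num_cols are negative (and the y-loop runs), A's flat range over their
-- positive product emits garbage blocks (negative or zero z coordinates), while B returns the
-- empty string, the intended result for non-positive grid dimensions.
def D_clearStructures (number_row : Int) (num_cols : Int) (y : Int) (toHeight : Bool) : Prop :=
  number_row < 0 ∧ num_cols < 0 ∧ (toHeight = true → 1 ≤ y)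
instance (number_row : Int) (num_cols : Int) (y : Int) (toHeight : Bool) : Decidable (D_clearStructures number_row num_cols y toHeight) := by unfold D_clearStructures; infer_instance

def Spec_clearStructures (number_row : Int) (num_cols : Int) (y : Int) (toHeight : Bool) (out : String) : Prop := ¬ D_clearStructures number_row num_cols y toHeight → out = clearStructures_alt number_row num_cols y toHeight
instance (number_row : Int) (num_cols : Int) (y : Int) (toHeight : Bool) (out : String) : Decidable (Spec_clearStructures number_row num_cols y toHeight out) := by unfold Spec_clearStructures; infer_instance

def pvDiffWitness_clearStructures : Int × Int × Int × Bool := (-1, -1, 5, false)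
def pvDiffWitnessOut_clearStructures : String × String :=
  ("<DrawBlock x= \"2\" y=\"5\" z= \"1\" type=\"air\" />\n", "")

-- ===== CLAIM (what is proved, stated in full; the proofs are below) =====
def Claim_unchanged_clearStructures : Prop := ∀ (number_row : Int) (num_cols : Int) (y : Int) (toHeight : Bool), Dom_clearStructures number_row num_cols y toHeight → Spec_clearStructures number_row num_cols y toHeight (clearStructures number_row num_cols y toHeight)
def Claim_changed_clearStructures : Prop := Dom_clearStructures (pvDiffWitness_clearStructures.1) (pvDiffWitness_clearStructures.2.1) (pvDiffWitness_clearStructures.2.2.1) (pvDiffWitness_clearStructures.2.2.2) ∧ D_clearStructures (pvDiffWitness_clearStructures.1) (pvDiffWitness_clearStructures.2.1) (pvDiffWitness_clearStructures.2.2.1) (pvDiffWitness_clearStructures.2.2.2) ∧ clearStructures (pvDiffWitness_clearStructures.1) (pvDiffWitness_clearStructures.2.1) (pvDiffWitness_clearStructures.2.2.1) (pvDiffWitness_clearStructures.2.2.2) = pvDiffWitnessOut_clearStructures.1 ∧ clearStructures_alt (pvDiffWitness_clearStructures.1) (pvDiffWitness_clearStructures.2.1) (pvDiffWitness_clearStructures.2.2.1)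 (pvDiffWitness_clearStructures.2.2.2) = pvDiffWitnessOut_clearStructures.2 ∧ pvDiffWitnessOut_clearStructures.1 ≠ pvDiffWitnessOut_clearStructures.2
def Claim_exact_clearStructures : Prop := ∀ (number_row : Int) (num_cols : Int) (y : Int) (toHeight : Bool), Dom_clearStructures number_row num_cols y toHeight → D_clearStructures number_row num_cols y toHeight → clearStructures number_row num_cols y toHeight ≠ clearStructures_alt number_row num_cols y toHeight

-- ===== LEMMAS AND PROOFS =====

def pvConcat (l : List String) : String := l.foldr (· ++ ·) ""

theorem pvConcat_nil : pvConcat [] = "" := rfl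

theorem pvConcat_cons (a : String) (t : List String) : pvConcat (a :: t) = a ++ pvConcat t := rfl

theorem pvConcat_append (l1 l2 : List String) : pvConcat (l1 ++ l2) = pvConcat l1 ++ pvConcat l2 := by
  induction l1 with
  | nil => simp [pvConcat]
  | cons a t ih => simp [pvConcat_cons, ih, String.append_assoc]

theorem pvConcat_flatMap {α : Type} (h : α → List String) (l : List α) :
    pvConcat (l.flatMap h) = pvConcat (l.map (fun x => pvConcat (h x))) := by
  induction l with
  | nil => rfl
  | cons a t ih => simp [List.flatMap_cons, pvConcat_append, pvConcat_cons, ih]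

theorem pv_sfoldl (g : Int → String) (l : List Int) (init : String) :
    l.foldl (fun a i => a ++ g i) init = init ++ pvConcat (l.map g) := by
  induction l generalizing init with
  | nil => simp [pvConcat]
  | cons a t ih => simp [List.foldl_cons, ih, pvConcat_cons, String.append_assoc]

theorem pvIntercalate_nil (l : List (List Char)) : ([] : List Char).intercalate l = l.flatten := by
  induction l with
  | nil => rfl
  | cons a t ih => cases t <;> simp_all [List.intercalate, List.intersperse]

theorem pvJoin_empty (l : List String) : PySem.Str.join "" l = pvConcat l := by
  induction l with
  | nil => rfl
  | cons a t ih =>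
    rw [pvConcat_cons, ← ih]
    simp [PySem.Str.join, PySem.Chars.join, pvIntercalate_nil, List.flatten_cons,
      String.ofList_append, String.ofList_toList]

-- row-major flat index loop = nested row/column loops, generically
theorem pvGrid {β : Type} (F : Nat → Nat → β) (m : Nat) (n : Nat) :
    (List.range (n * m)).map (fun i => F (i / m) (i % m))
      = (List.range n).flatMap (fun r => (List.range m).map (F r)) := by
  induction n with
  | zero => simp
  | succ n ih =>
    rcases Nat.eq_zero_or_pos m with hm | hm
    · subst hm; simp
    · have h1 : (n + 1) * m = n * m + m := by ring
      rw [h1, List.range_add, List.map_append, ih, List.range_succ, List.flatMap_append]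
      simp only [List.map_map, List.flatMap_cons, List.flatMap_nil, List.append_nil]
      congr 1
      apply List.map_congr_left
      intro c hc
      have hcm : c < m := List.mem_range.mp hc
      have hd : (n * m + c) / m = n := by
        rw [Nat.add_comm, Nat.add_mul_div_right _ _ hm, Nat.div_eq_of_lt hcm]
        omega
      have hmod : (n * m + c) % m = c := by
        rw [Nat.add_comm, Nat.add_mul_mod_self_right, Nat.mod_eq_of_lt hcm]
      simp [Function.comp, hd, hmod]

-- per-y inner equality, whenever at least one dimension is nonnegative
theorem pvInner (nr nc yy : Int) (h : 0 ≤ nr ∨ 0 ≤ nc) :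
    (PySem.List.pyRange 0 (nr * nc)).map
        (fun i => pvLine |nr - PySem.Int.floordiv i nc - 1| yy (PySem.Int.mod i nc + 1))
      = (PySem.List.pyRange 0 nr).flatMap (fun r =>
          (PySem.List.pyRange 0 nc).map (fun c => pvLine (nr - 1 - r) yy (c + 1))) := by
  rcases lt_or_ge nr 0 with h1 | h1
  · have hc : 0 ≤ nc := h.resolve_left (by omega)
    have hmul : nr * nc ≤ 0 := mul_nonpos_iff.mpr (Or.inr ⟨le_of_lt h1, hc⟩)
    rw [PySem.List.pyRange_one_eq_nil hmul, PySem.List.pyRange_one_eq_nil (le_of_lt h1)]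
    simp
  · rcases lt_or_ge nc 0 with h2 | h2
    · have hmul : nr * nc ≤ 0 := mul_nonpos_iff.mpr (Or.inl ⟨h1, le_of_lt h2⟩)
      rw [PySem.List.pyRange_one_eq_nil hmul, PySem.List.pyRange_one_eq_nil (le_of_lt h2)]
      simp
    · obtain ⟨n, rfl⟩ := Int.eq_ofNat_of_zero_le h1
      obtain ⟨m, rfl⟩ := Int.eq_ofNat_of_zero_le h2
      have hnm : (n : Int) * m = ((n * m : Nat) : Int) := by push_cast; ring
      rw [hnm, PySem.List.pyRange_zero_nat, PySem.List.pyRange_zero_nat,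
        PySem.List.pyRange_zero_nat, List.map_map]
      rcases Nat.eq_zero_or_pos m with hm | hm
      · subst hm; simp
      · rw [List.flatMap_map]
        simp only [List.map_map]
        have hmain := pvGrid (fun r c => pvLine ((n : Int) - 1 - r) yy ((c : Int) + 1)) m n
        refine Eq.trans ?_ (Eq.trans hmain ?_)
        · apply List.map_congr_left
          intro i hi
          have him : i < n * m := List.mem_range.mp hi
          have hdiv : i / m < n := Nat.div_lt_of_lt_mul (Nat.mul_comm n m ▸ him)
          simp only [Function.comp_def, PySem.Int.floordiv_natCast, PySem.Int.mod_natCast]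
          have habs : |(n : Int) - (i / m : Nat) - 1| = (n : Int) - 1 - (i / m : Nat) := by
            have h' : ((i / m : Nat) : Int) < (n : Int) := by exact_mod_cast hdiv
            rw [abs_of_nonneg (by omega)]
            ring
          rw [habs]
        · exact congrFun (congrArg List.flatMap (funext fun r => by
            simp only [Function.comp_def])) (List.range n)

-- A in canonical form
theorem pvA_eq (nr nc y : Int) (th : Bool) :
    clearStructures nr nc y th =
      pvConcat ((PySem.List.pyRange (if th then 1 else y) (y + 1)).map (fun yy =>
        pvConcat ((PySem.List.pyRange 0 (nr * nc)).map (fun i =>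
          pvLine |nr - PySem.Int.floordiv i nc - 1| yy (PySem.Int.mod i nc + 1))))) := by
  unfold clearStructures pvConvertIndexToXZ
  simp only [pv_sfoldl]
  simp

theorem pvFlatMap_nil_fun {α β : Type} (l : List α) : l.flatMap (fun _ => ([] : List β)) = [] := by
  induction l <;> simp_all

theorem pvConcat_map_empty {α : Type} (l : List α) : pvConcat (l.map (fun _ => "")) = "" := by
  induction l with
  | nil => rfl
  | cons a t ih =>
    rw [List.map_cons, pvConcat_cons, ih]
    decide

-- B in canonical form
theorem pvB_eq (nr nc y : Int) (th : Bool) :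
    clearStructures_alt nr nc y th =
      pvConcat ((PySem.List.pyRange (if th then 1 else y) (y + 1)).map (fun yy =>
        pvConcat ((PySem.List.pyRange 0 nr).flatMap (fun r =>
          (PySem.List.pyRange 0 nc).map (fun c => pvLine (nr - 1 - r) yy (c + 1)))))) := by
  unfold clearStructures_alt
  by_cases hg : nr ≤ 0 ∨ nc ≤ 0
  · rw [if_pos hg]
    rcases hg with hnr | hnc
    · rw [PySem.List.pyRange_one_eq_nil hnr]
      simp only [List.flatMap_nil, pvConcat_nil]
      exact (pvConcat_map_empty _).symm
    · rw [PySem.List.pyRange_one_eq_nil hnc]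
      simp only [List.map_nil, pvFlatMap_nil_fun, pvConcat_nil]
      exact (pvConcat_map_empty _).symm
  · rw [if_neg hg]
    simp only [PySem.List.foldl_append_singleton_eq_map, PySem.List.foldl_append_eq_flatMap,
      List.nil_append, pvJoin_empty, pvConcat_flatMap]

theorem pvLen_nonneg (s : String) : 0 ≤ PySem.Str.len s := by
  simp [PySem.Str.len_eq]

theorem pvLen_append_pos_left (s t : String) (h : 0 < PySem.Str.len s) :
    0 < PySem.Str.len (s ++ t) := by
  have := pvLen_nonneg t
  rw [PySem.Str.len_append]
  omega

theorem pv_append_ne_empty (s t : String) (h : 0 < PySem.Str.len s) : s ++ t ≠ "" := by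
  intro he
  have hl := congrArg PySem.Str.len he
  rw [PySem.Str.len_append] at hl
  have ht := pvLen_nonneg t
  have h0 : PySem.Str.len "" = 0 := by decide
  omega

theorem pvLine_len_pos (x yy z : Int) : 0 < PySem.Str.len (pvLine x yy z) := by
  unfold pvLine
  repeat apply pvLen_append_pos_left
  decide

-- ===== VERDICT (by name: the statement is the Claim_ definition above) =====
theorem clearStructures_spec : Claim_unchanged_clearStructures := by
  intro nr nc y th hDom
  unfold Spec_clearStructures
  intro hD
  rw [pvA_eq, pvB_eq]
  by_cases hcase : 0 ≤ nr ∨ 0 ≤ nc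
  · congr 1
    apply List.map_congr_left
    intro yy _
    rw [pvInner nr nc yy hcase]
  · have h1 : nr < 0 := by omega
    have h2 : nc < 0 := by omega
    have hni : ¬ (th = true → 1 ≤ y) := fun hh => hD ⟨h1, h2, hh⟩
    cases th with
    | false => exact absurd (fun hh => absurd hh (by simp)) hni
    | true =>
      have hy : ¬ 1 ≤ y := fun hy => hni (fun _ => hy)
      have hnil : PySem.List.pyRange (1 : Int) (y + 1) = [] :=
        PySem.List.pyRange_one_eq_nil (by omega)
      simp only [reduceIte, hnil, List.map_nil, pvConcat_nil]

theorem clearStructures_changed : Claim_changed_clearStructures := by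
  unfold Claim_changed_clearStructures; decide

theorem clearStructures_tight : Claim_exact_clearStructures := by
  intro nr nc y th hDom hD
  obtain ⟨h1, h2, h3⟩ := hD
  rw [pvA_eq, pvB_eq]
  have hBnil : PySem.List.pyRange 0 nr = [] := PySem.List.pyRange_one_eq_nil (le_of_lt h1)
  have hB : pvConcat ((PySem.List.pyRange (if th then 1 else y) (y + 1)).map (fun yy =>
      pvConcat ((PySem.List.pyRange 0 nr).flatMap (fun r =>
        (PySem.List.pyRange 0 nc).map (fun c => pvLine (nr - 1 - r) yy (c + 1)))))) = "" := by
    rw [hBnil]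
    simp only [List.flatMap_nil, pvConcat_nil]
    exact pvConcat_map_empty _
  rw [hB]
  -- A side is a nonempty string: the y-range and the index range are both nonempty
  have hy : (if th then (1 : Int) else y) < y + 1 := by
    split_ifs with hth
    · have := h3 hth; omega
    · omega
  have hmul : (0 : Int) < nr * nc := mul_pos_of_neg_of_neg h1 h2
  rw [PySem.List.pyRange_one_cons hy, PySem.List.pyRange_one_cons hmul, List.map_cons,
    List.map_cons, pvConcat_cons, pvConcat_cons]
  exact pv_append_ne_empty _ _ (pvLen_append_pos_left _ _ (pvLine_len_pos _ _ _))
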